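-- pv_equiv track=rewrite | github.com/noahcape/compBio315 | lab02/three_alignment.py | init_matrix_three_alignment
-- ===== SOURCE A (Python) =====
-- THREE_GAP = -3
--
-- def init_matrix_three_alignment(str_1, str_2, str_3):
--     matrix = [ [[0 for _ in range(len(str_3) + 1)] for _ in range(len(str_2) + 1)] for _ in range(len(str_1) + 1)]
--
--     for i in range(1, len(str_1) + 1):
--         matrix[i][0][0] = matrix[i - 1][0][0] + THREE_GAP
--
--     for j in range(1, len(str_2) + 1):
--         matrix[0][j][0] = matrix[0][j - 1][0] + THREE_GAP
--
--     for k in range(1, len(str_3) + 1):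
--         matrix[0][0][k] = matrix[0][0][k - 1] + THREE_GAP
--
--     return matrix
-- ===== SOURCE B (Python) =====
-- THREE_GAP = -3
--
-- def init_matrix_three_alignment(str_1, str_2, str_3):
--     def border(i, j, k):
--         if j == 0 and k == 0:
--             return THREE_GAP * i
--         if i == 0 and k == 0:
--             return THREE_GAP * j
--         if i == 0 and j == 0:
--             return THREE_GAP * k
--         return 0
--     return [[[border(i, j, k) for k in range(len(str_3) + 1)]
--              for j in range(len(str_2) + 1)]
--             for i in range(len(str_1) + 1)]
-- ===== Notes on version B (the rewrite author's own statement) =====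
-- stated objective: simpler
-- what changed: Builds the whole 3D matrix in a single nested comprehension with the gap borders given by a closed form (THREE_GAP*index) instead of allocating a zero matrix and then running three separate accumulation loops over its borders.
import Mathlib
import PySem

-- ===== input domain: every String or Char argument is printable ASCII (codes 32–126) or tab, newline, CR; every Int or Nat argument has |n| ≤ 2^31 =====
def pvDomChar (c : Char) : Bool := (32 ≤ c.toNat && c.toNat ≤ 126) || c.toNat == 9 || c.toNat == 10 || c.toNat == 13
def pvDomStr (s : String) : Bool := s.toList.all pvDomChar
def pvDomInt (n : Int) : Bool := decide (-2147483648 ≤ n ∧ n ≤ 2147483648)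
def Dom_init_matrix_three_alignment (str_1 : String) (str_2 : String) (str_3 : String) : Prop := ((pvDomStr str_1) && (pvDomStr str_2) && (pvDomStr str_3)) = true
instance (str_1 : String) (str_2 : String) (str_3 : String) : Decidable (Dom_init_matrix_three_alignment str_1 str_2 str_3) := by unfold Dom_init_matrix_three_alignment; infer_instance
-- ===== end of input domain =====

-- B replaces A's allocate-zeros-then-three-border-loops with a single nested
-- comprehension writing the border values by closed form (objective: simpler).

-- ===== PORT A =====
-- matrix[i][j][k] read; indices produced by A's loops are always in range, so getD is exact
def pvGet3 (m : List (List (List Int))) (i j k : Nat) : Int :=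
  ((m.getD i []).getD j []).getD k 0

-- matrix[i][j][k] = v mutation; i,j,k always in range in A's loops, so List.set is exact
def pvSet3 (m : List (List (List Int))) (i j k : Nat) (v : Int) : List (List (List Int)) :=
  m.set i ((m.getD i []).set j (((m.getD i []).getD j []).set k v))

def init_matrix_three_alignment (str_1 : String) (str_2 : String) (str_3 : String) : List (List (List Int)) :=
  let n1 := str_1.toList.length
  let n2 := str_2.toList.length
  let n3 := str_3.toList.length
  -- matrix = [[[0 …]]]  (nested comprehensions of zeros)
  let matrix : List (List (List Int)) :=
    List.replicate (n1 + 1) (List.replicate (n2 + 1) (List.replicate (n3 + 1) (0 : Int)))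
  -- for i in range(1, n1+1): matrix[i][0][0] = matrix[i-1][0][0] + THREE_GAP
  let matrix := (List.range n1).foldl
    (fun m i' => let i := i' + 1; pvSet3 m i 0 0 (pvGet3 m (i - 1) 0 0 + (-3))) matrix
  -- for j in range(1, n2+1): matrix[0][j][0] = matrix[0][j-1][0] + THREE_GAP
  let matrix := (List.range n2).foldl
    (fun m j' => let j := j' + 1; pvSet3 m 0 j 0 (pvGet3 m 0 (j - 1) 0 + (-3))) matrix
  -- for k in range(1, n3+1): matrix[0][0][k] = matrix[0][0][k-1] + THREE_GAP
  let matrix := (List.range n3).foldl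
    (fun m k' => let k := k' + 1; pvSet3 m 0 0 k (pvGet3 m 0 0 (k - 1) + (-3))) matrix
  matrix

-- ===== PORT B =====
def pvBorder (i j k : Nat) : Int :=
  if j = 0 ∧ k = 0 then -3 * (i : Int)
  else if i = 0 ∧ k = 0 then -3 * (j : Int)
  else if i = 0 ∧ j = 0 then -3 * (k : Int)
  else 0

def init_matrix_three_alignment_alt (str_1 : String) (str_2 : String) (str_3 : String) : List (List (List Int)) :=
  (List.range (str_1.toList.length + 1)).map fun i =>
    (List.range (str_2.toList.length + 1)).map fun j =>
      (List.range (str_3.toList.length + 1)).map fun k => pvBorder i j k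

-- ===== PRECONDITION & SPEC =====
def Spec_init_matrix_three_alignment (str_1 : String) (str_2 : String) (str_3 : String) (out : List (List (List Int))) : Prop := out = init_matrix_three_alignment_alt str_1 str_2 str_3
instance (str_1 : String) (str_2 : String) (str_3 : String) (out : List (List (List Int))) : Decidable (Spec_init_matrix_three_alignment str_1 str_2 str_3 out) := by unfold Spec_init_matrix_three_alignment; infer_instance

-- ===== CLAIM (what is proved, stated in full; the proofs are below) =====
def Claim_equal_init_matrix_three_alignment : Prop := ∀ (str_1 : String) (str_2 : String) (str_3 : String), Dom_init_matrix_three_alignment str_1 str_2 str_3 → Spec_init_matrix_three_alignment str_1 str_2 str_3 (init_matrix_three_alignment str_1 str_2 str_3)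

-- ===== LEMMAS AND PROOFS =====

/-- A matrix given as a function table over the three ranges. -/
def pvMk (n1 n2 n3 : Nat) (f : Nat → Nat → Nat → Int) : List (List (List Int)) :=
  (List.range (n1 + 1)).map fun i =>
    (List.range (n2 + 1)).map fun j =>
      (List.range (n3 + 1)).map fun k => f i j k

theorem pvMk_congr (n1 n2 n3 : Nat) (f g : Nat → Nat → Nat → Int)
    (h : ∀ i j k, i ≤ n1 → j ≤ n2 → k ≤ n3 → f i j k = g i j k) :
    pvMk n1 n2 n3 f = pvMk n1 n2 n3 g := by
  unfold pvMk
  refine List.map_congr_left (fun i hi => ?_)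
  refine List.map_congr_left (fun j hj => ?_)
  refine List.map_congr_left (fun k hk => ?_)
  simp only [List.mem_range, Nat.lt_succ_iff] at hi hj hk
  exact h i j k hi hj hk

theorem pvGet3_mk (n1 n2 n3 : Nat) (f : Nat → Nat → Nat → Int) (i j k : Nat)
    (h1 : i ≤ n1) (h2 : j ≤ n2) (h3 : k ≤ n3) :
    pvGet3 (pvMk n1 n2 n3 f) i j k = f i j k := by
  have h1' : i < n1 + 1 := Nat.lt_succ_of_le h1
  have h2' : j < n2 + 1 := Nat.lt_succ_of_le h2
  have h3' : k < n3 + 1 := Nat.lt_succ_of_le h3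
  simp [pvGet3, pvMk, List.getD_eq_getElem?_getD, h1', h2', h3']

theorem pv_set_map_range {α : Type} (n p : Nat) (g : Nat → α) (x : α) :
    ((List.range n).map g).set p x = (List.range n).map (fun q => if q = p then x else g q) := by
  apply List.ext_getElem
  · simp
  intro a ha _
  simp only [List.length_set, List.length_map, List.length_range] at ha
  simp only [List.getElem_set, List.getElem_map, List.getElem_range]
  by_cases h : p = a
  · rw [if_pos h, if_pos h.symm]
  · rw [if_neg h, if_neg (fun hh : a = p => h hh.symm)]

theorem pvRow_mk (n1 n2 n3 : Nat) (f : Nat → Nat → Nat → Int) (i : Nat) (h1 : i < n1 + 1) :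
    (pvMk n1 n2 n3 f).getD i []
      = (List.range (n2 + 1)).map (fun j => (List.range (n3 + 1)).map fun k => f i j k) := by
  simp [pvMk, List.getD_eq_getElem?_getD, h1]

theorem pvSet3_mk (n1 n2 n3 : Nat) (f : Nat → Nat → Nat → Int) (i j k : Nat) (v : Int)
    (h1 : i ≤ n1) (h2 : j ≤ n2) (h3 : k ≤ n3) :
    pvSet3 (pvMk n1 n2 n3 f) i j k v
      = pvMk n1 n2 n3 (fun i' j' k' => if i' = i ∧ j' = j ∧ k' = k then v else f i' j' k') := by
  have h1' : i < n1 + 1 := Nat.lt_succ_of_le h1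
  have h2' : j < n2 + 1 := Nat.lt_succ_of_le h2
  have h3' : k < n3 + 1 := Nat.lt_succ_of_le h3
  have hcell : ((List.range (n2 + 1)).map (fun j =>
        (List.range (n3 + 1)).map fun k => f i j k)).getD j []
      = (List.range (n3 + 1)).map fun k => f i j k := by
    simp [List.getD_eq_getElem?_getD, h2']
  unfold pvSet3
  rw [pvRow_mk n1 n2 n3 f i h1', hcell,
    pv_set_map_range _ k, pv_set_map_range _ j]
  show (pvMk n1 n2 n3 f).set i _ = _
  unfold pvMk
  rw [pv_set_map_range _ i]
  refine List.map_congr_left (fun a _ => ?_)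
  by_cases ha : a = i
  · subst ha
    rw [if_pos rfl]
    refine List.map_congr_left (fun b _ => ?_)
    by_cases hb : b = j
    · subst hb
      rw [if_pos rfl]
      refine List.map_congr_left (fun c _ => ?_)
      by_cases hc : c = k
      · simp [hc]
      · simp [hc]
    · simp [hb]
  · simp [ha]

/-- Effect of the first t iterations of A's i-loop. -/
theorem pv_loop1 (n1 n2 n3 : Nat) (t : Nat) (ht : t ≤ n1) :
    (List.range t).foldl
      (fun m i' => let i := i' + 1; pvSet3 m i 0 0 (pvGet3 m (i - 1) 0 0 + (-3)))
      (pvMk n1 n2 n3 (fun _ _ _ => 0))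
    = pvMk n1 n2 n3 (fun i j k => if j = 0 ∧ k = 0 ∧ i ≤ t then -3 * (i : Int) else 0) := by
  induction t with
  | zero =>
    simp only [List.range_zero, List.foldl_nil]
    apply pvMk_congr; intro i j k _ _ _
    split_ifs <;> omega
  | succ t ih =>
    rw [List.range_succ, List.foldl_append, ih (by omega)]
    simp only [List.foldl_cons, List.foldl_nil]
    rw [pvGet3_mk _ _ _ _ _ _ _ (by omega) (by omega) (by omega)]
    rw [pvSet3_mk _ _ _ _ _ _ _ _ (by omega) (by omega) (by omega)]
    apply pvMk_congr; intro i j k _ _ _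
    dsimp only
    split_ifs <;> omega

/-- Effect of the first t iterations of A's j-loop. -/
theorem pv_loop2 (n1 n2 n3 : Nat) (t : Nat) (ht : t ≤ n2) :
    (List.range t).foldl
      (fun m j' => let j := j' + 1; pvSet3 m 0 j 0 (pvGet3 m 0 (j - 1) 0 + (-3)))
      (pvMk n1 n2 n3 (fun i j k => if j = 0 ∧ k = 0 then -3 * (i : Int) else 0))
    = pvMk n1 n2 n3 (fun i j k =>
        if j = 0 ∧ k = 0 then -3 * (i : Int)
        else if i = 0 ∧ k = 0 ∧ j ≤ t then -3 * (j : Int) else 0) := by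
  induction t with
  | zero =>
    simp only [List.range_zero, List.foldl_nil]
    apply pvMk_congr; intro i j k _ _ _
    split_ifs <;> omega
  | succ t ih =>
    rw [List.range_succ, List.foldl_append, ih (by omega)]
    simp only [List.foldl_cons, List.foldl_nil]
    rw [pvGet3_mk _ _ _ _ _ _ _ (by omega) (by omega) (by omega)]
    rw [pvSet3_mk _ _ _ _ _ _ _ _ (by omega) (by omega) (by omega)]
    apply pvMk_congr; intro i j k _ _ _
    dsimp only
    split_ifs <;> omega

/-- Effect of the first t iterations of A's k-loop. -/
theorem pv_loop3 (n1 n2 n3 : Nat) (t : Nat) (ht : t ≤ n3) :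
    (List.range t).foldl
      (fun m k' => let k := k' + 1; pvSet3 m 0 0 k (pvGet3 m 0 0 (k - 1) + (-3)))
      (pvMk n1 n2 n3 (fun i j k =>
        if j = 0 ∧ k = 0 then -3 * (i : Int)
        else if i = 0 ∧ k = 0 then -3 * (j : Int) else 0))
    = pvMk n1 n2 n3 (fun i j k =>
        if j = 0 ∧ k = 0 then -3 * (i : Int)
        else if i = 0 ∧ k = 0 then -3 * (j : Int)
        else if i = 0 ∧ j = 0 ∧ k ≤ t then -3 * (k : Int) else 0) := by
  induction t with
  | zero =>
    simp only [List.range_zero, List.foldl_nil]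
    apply pvMk_congr; intro i j k _ _ _
    split_ifs <;> omega
  | succ t ih =>
    rw [List.range_succ, List.foldl_append, ih (by omega)]
    simp only [List.foldl_cons, List.foldl_nil]
    rw [pvGet3_mk _ _ _ _ _ _ _ (by omega) (by omega) (by omega)]
    rw [pvSet3_mk _ _ _ _ _ _ _ _ (by omega) (by omega) (by omega)]
    apply pvMk_congr; intro i j k _ _ _
    dsimp only
    split_ifs <;> omega

-- ===== VERDICT (by name: the statement is the Claim_ definition above) =====
theorem init_matrix_three_alignment_spec : Claim_equal_init_matrix_three_alignment := by
  intro s1 s2 s3 _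
  unfold Spec_init_matrix_three_alignment init_matrix_three_alignment init_matrix_three_alignment_alt
  set n1 := s1.toList.length
  set n2 := s2.toList.length
  set n3 := s3.toList.length
  have hzero : List.replicate (n1 + 1) (List.replicate (n2 + 1) (List.replicate (n3 + 1) (0 : Int)))
      = pvMk n1 n2 n3 (fun _ _ _ => 0) := by
    simp [pvMk, List.map_const']
  simp only [hzero]
  rw [pv_loop1 n1 n2 n3 n1 le_rfl]
  have e1 : pvMk n1 n2 n3 (fun i j k => if j = 0 ∧ k = 0 ∧ i ≤ n1 then -3 * (i : Int) else 0)
      = pvMk n1 n2 n3 (fun i j k => if j = 0 ∧ k = 0 then -3 * (i : Int) else 0) := by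
    apply pvMk_congr; intro i j k hi _ _
    by_cases h : j = 0 ∧ k = 0
    · have : j = 0 ∧ k = 0 ∧ i ≤ n1 := ⟨h.1, h.2, hi⟩
      simp [h, this]
    · have : ¬ (j = 0 ∧ k = 0 ∧ i ≤ n1) := fun hc => h ⟨hc.1, hc.2.1⟩
      simp [h, this]
  rw [e1, pv_loop2 n1 n2 n3 n2 le_rfl]
  have e2 : pvMk n1 n2 n3 (fun i j k =>
        if j = 0 ∧ k = 0 then -3 * (i : Int)
        else if i = 0 ∧ k = 0 ∧ j ≤ n2 then -3 * (j : Int) else 0)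
      = pvMk n1 n2 n3 (fun i j k =>
        if j = 0 ∧ k = 0 then -3 * (i : Int)
        else if i = 0 ∧ k = 0 then -3 * (j : Int) else 0) := by
    apply pvMk_congr; intro i j k _ hj _
    by_cases h : j = 0 ∧ k = 0
    · simp [h]
    · by_cases h2 : i = 0 ∧ k = 0
      · have : i = 0 ∧ k = 0 ∧ j ≤ n2 := ⟨h2.1, h2.2, hj⟩
        simp [h, h2, this]
      · have : ¬ (i = 0 ∧ k = 0 ∧ j ≤ n2) := fun hc => h2 ⟨hc.1, hc.2.1⟩
        simp [h, h2, this]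
  rw [e2, pv_loop3 n1 n2 n3 n3 le_rfl]
  have e3 : pvMk n1 n2 n3 (fun i j k =>
        if j = 0 ∧ k = 0 then -3 * (i : Int)
        else if i = 0 ∧ k = 0 then -3 * (j : Int)
        else if i = 0 ∧ j = 0 ∧ k ≤ n3 then -3 * (k : Int) else 0)
      = pvMk n1 n2 n3 pvBorder := by
    apply pvMk_congr; intro i j k _ _ hk
    unfold pvBorder
    by_cases h : j = 0 ∧ k = 0
    · simp [h]
    · by_cases h2 : i = 0 ∧ k = 0
      · simp [h, h2]
      · by_cases h3 : i = 0 ∧ j = 0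
        · have : i = 0 ∧ j = 0 ∧ k ≤ n3 := ⟨h3.1, h3.2, hk⟩
          simp [h, h2, h3, this]
        · have : ¬ (i = 0 ∧ j = 0 ∧ k ≤ n3) := fun hc => h3 ⟨hc.1, hc.2.1⟩
          simp [h, h2, h3, this]
  rw [e3]
  rfl
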